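-- pv_equiv track=rewrite | github.com/ahmedtechm/Codeline-Challenge-Measurement-Conversion | main_app.py | convert_measurement_string
-- ===== SOURCE A (Python) =====
-- def convert_measurement_string(measurement_string):
--     packages = measurement_string.split(',')  # Split measurement string into packages
--     converted_packages = []
--
--     for package in packages:
--         package_values = []
--         count = ""
--
--         for char in package:
--             if char == 'z':
--                 break  # Terminate decoding if non-'z' character is encountered
--
--             if char.isdigit():
--                 count += char
--             else:
--                 if count:
--                     package_values.append(int(count))
--                     count = ""
--
--                 value = ord(char) - ord('a') + 1  # Convert char to numeric value
--                 package_values.append(value)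
--
--         if count:
--             package_values.append(int(count))
--
--         total_value = sum(package_values)
--         converted_packages.append(total_value)
--
--     return converted_packages
-- ===== SOURCE B (Python) =====
-- def convert_measurement_string(measurement_string):
--     return [_decode(package.split('z', 1)[0])
--             for package in measurement_string.split(',')]
--
--
-- def _decode(body):
--     """Sum a z-free body by maximal runs: a digit run is one number,
--     a non-digit run is the sum of its letter values."""
--     if not body:
--         return 0
--     key = body[0].isdigit()
--     i = 1
--     while i < len(body) and body[i].isdigit() == key:
--         i += 1
--     run, rest = body[:i], body[i:]
--     value = int(run) if key else sum(ord(c) - 96 for c in run)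
--     return value + _decode(rest)
-- ===== Notes on version B (the rewrite author's own statement) =====
-- stated objective: alternative
-- what changed: A's char-by-char state machine with a pending digit buffer is replaced by truncating each package at the first 'z' via split('z', 1)[0] and then recursing over maximal same-class runs, converting each digit run with one int() and each non-digit run with one sum of letter values.
import Mathlib
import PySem

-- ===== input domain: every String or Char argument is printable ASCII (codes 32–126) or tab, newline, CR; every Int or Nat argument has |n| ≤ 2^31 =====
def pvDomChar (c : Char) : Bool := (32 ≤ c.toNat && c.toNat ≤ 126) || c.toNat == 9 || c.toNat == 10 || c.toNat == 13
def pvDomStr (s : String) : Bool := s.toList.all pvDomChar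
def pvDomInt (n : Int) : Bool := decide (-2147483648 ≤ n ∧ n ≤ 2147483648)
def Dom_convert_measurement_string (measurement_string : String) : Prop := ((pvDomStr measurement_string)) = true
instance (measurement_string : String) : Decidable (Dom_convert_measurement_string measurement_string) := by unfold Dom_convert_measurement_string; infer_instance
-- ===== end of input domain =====

-- B replaces A's char-by-char pending-count state machine by: truncate each package at the
-- first 'z' with split('z', 1)[0], then recurse over maximal same-class runs (one int() per
-- digit run, one sum per letter run).  Objective: alternative decomposition, same cost.

-- ===== PORT A =====

-- int(count) for the pending digit string (count is always nonempty all-digits when called)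
def pvIntOf (cs : List Char) : Int := (PySem.Int.ofChars? cs).getD 0

-- the inner `for char in package` loop: state = (count, package_values); break on 'z',
-- then the post-loop `if count:` flush; returns the final package_values
def pvLoopA : List Char → List Char → List Int → List Int
  | [], count, vals => if count.isEmpty then vals else vals ++ [pvIntOf count]
  | c :: cs, count, vals =>
    if c == 'z' then (if count.isEmpty then vals else vals ++ [pvIntOf count])
    else if PySem.Chars.isdigit c then pvLoopA cs (count ++ [c]) vals
    else pvLoopA cs [] ((if count.isEmpty then vals else vals ++ [pvIntOf count])
                          ++ [((c.toNat : Int) - 97) + 1])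

def convert_measurement_string (measurement_string : String) : List Int :=
  (PySem.Chars.splitOn measurement_string.toList [',']).map
    (fun package => (pvLoopA package [] []).sum)

-- ===== PORT B =====

-- the `while i < len(body) and body[i].isdigit() == key: i += 1` scan of _decode
def pvRunEnd (body : List Char) (key : Bool) (i : Nat) : Nat :=
  if h : i < body.length then
    if PySem.Chars.isdigit body[i] == key then pvRunEnd body key (i + 1) else i
  else i
termination_by body.length - i

theorem pvRunEnd_ge_aux (body : List Char) (key : Bool) :
    ∀ n i, body.length - i ≤ n → i ≤ pvRunEnd body key i := by
  intro n
  induction n with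
  | zero => intro i h; rw [pvRunEnd]; split_ifs with h1 h2 <;> omega
  | succ n ih =>
    intro i h
    rw [pvRunEnd]
    split_ifs with h1 h2
    · have := ih (i + 1) (by omega); omega
    · exact le_refl i
    · exact le_refl i

theorem pvRunEnd_ge (body : List Char) (key : Bool) (i : Nat) : i ≤ pvRunEnd body key i :=
  pvRunEnd_ge_aux body key (body.length - i) i le_rfl

-- _decode(body): value of the leading maximal run plus the decode of the rest
def pvDecode : List Char → Int
  | [] => 0
  | c :: tl =>
    (if PySem.Chars.isdigit c
      then pvIntOf ((c :: tl).take (pvRunEnd (c :: tl) (PySem.Chars.isdigit c) 1))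
      else (((c :: tl).take (pvRunEnd (c :: tl) (PySem.Chars.isdigit c) 1)).map
              (fun d => (d.toNat : Int) - 96)).sum)
    + pvDecode ((c :: tl).drop (pvRunEnd (c :: tl) (PySem.Chars.isdigit c) 1))
termination_by body => body.length
decreasing_by
  have := pvRunEnd_ge (c :: tl) (PySem.Chars.isdigit c) 1
  simp [List.length_drop]; omega

def convert_measurement_string_alt (measurement_string : String) : List Int :=
  (PySem.Chars.splitOn measurement_string.toList [',']).map
    (fun package =>
      pvDecode (((PySem.Chars.splitMax? package ['z'] 1).getD []).headD []))

-- ===== PRECONDITION & SPEC =====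
def Spec_convert_measurement_string (measurement_string : String) (out : List Int) : Prop := out = convert_measurement_string_alt measurement_string
instance (measurement_string : String) (out : List Int) : Decidable (Spec_convert_measurement_string measurement_string out) := by unfold Spec_convert_measurement_string; infer_instance

-- ===== CLAIM (what is proved, stated in full; the proofs are below) =====
def Claim_equal_convert_measurement_string : Prop := ∀ (measurement_string : String), Dom_convert_measurement_string measurement_string → Spec_convert_measurement_string measurement_string (convert_measurement_string measurement_string)

-- ===== LEMMAS AND PROOFS =====

-- pvRunEnd is i plus the length of the maximal key-class run starting at i
theorem pvRunEnd_eq (body : List Char) (key : Bool) (i : Nat) :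
    pvRunEnd body key i
      = i + ((body.drop i).takeWhile (fun d => PySem.Chars.isdigit d == key)).length := by
  have aux : ∀ n i, body.length - i ≤ n →
      pvRunEnd body key i
        = i + ((body.drop i).takeWhile (fun d => PySem.Chars.isdigit d == key)).length := by
    intro n
    induction n with
    | zero =>
      intro i h
      rw [pvRunEnd]
      split_ifs with h1 h2
      · omega
      · omega
      · rw [List.drop_of_length_le (by omega)]; simp
    | succ n ih =>
      intro i h
      rw [pvRunEnd]
      split_ifs with h1 h2
      · rw [ih (i + 1) (by omega), ← List.getElem_cons_drop h1, List.takeWhile_cons]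
        simp only [h2, if_true, List.length_cons]
        omega
      · rw [← List.getElem_cons_drop h1, List.takeWhile_cons]
        simp only [h2, if_false, Bool.false_eq_true, List.length_nil]
        omega
      · rw [List.drop_of_length_le (by omega)]; simp
  exact aux (body.length - i) i le_rfl

-- truncation: one fuel-0 step of splitOnMax.go returns the remainder as a single piece
theorem pvGo0 (fuel : Nat) (l cur : List Char) (acc : List (List Char)) :
    PySem.Chars.splitOnMax.go ['z'] fuel 0 l cur acc = ((cur.reverse ++ l) :: acc).reverse := by
  cases fuel with
  | zero => rw [PySem.Chars.splitOnMax.go]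
  | succ n =>
    cases l with
    | nil => rw [PySem.Chars.splitOnMax.go]; simp; omega
    | cons c rest => rw [PySem.Chars.splitOnMax.go]; simp

theorem pvGo1 (fuel : Nat) (l cur : List Char) (acc : List (List Char))
    (h : l.length < fuel) :
    PySem.Chars.splitOnMax.go ['z'] fuel 1 l cur acc
      = acc.reverse ++ ((cur.reverse ++ l.takeWhile (fun c => c != 'z')) ::
          (if (l.dropWhile (fun c => c != 'z')) = [] then []
           else [(l.dropWhile (fun c => c != 'z')).drop 1])) := by
  induction fuel generalizing l cur acc with
  | zero => omega
  | succ n ih =>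
    cases l with
    | nil => rw [PySem.Chars.splitOnMax.go]; simp; omega
    | cons c rest =>
      rw [PySem.Chars.splitOnMax.go]
      by_cases hz : c = 'z'
      · subst hz
        simp only [List.isPrefixOf, BEq.rfl, if_true,
          Bool.and_true]
        rw [if_neg (by omega)]
        simp [pvGo0]
      · have hpre : (['z'].isPrefixOf (c :: rest)) = false := by
          simp [List.isPrefixOf]; exact fun h => (hz h.symm).elim
        rw [if_neg (by omega), hpre]
        simp only [Bool.false_eq_true, if_false]
        rw [ih rest (c :: cur) acc (by simp at h ⊢; omega)]
        have hc : (c != 'z') = true := by simp [hz]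
        simp [hc]

theorem pvBody_eq (p : List Char) :
    ((PySem.Chars.splitMax? p ['z'] 1).getD []).headD [] = p.takeWhile (fun c => c != 'z') := by
  simp only [PySem.Chars.splitMax?, PySem.Chars.splitOnMax, List.isEmpty_cons,
    Bool.false_eq_true, if_false, Option.getD_some]
  rw [if_neg (by omega), show Int.toNat 1 = 1 from rfl, pvGo1 _ _ _ _ (by omega)]
  split <;> simp

-- A's loop only ever reads the prefix before the first 'z'
theorem pvLoopA_takeWhile (p : List Char) : ∀ count vals,
    pvLoopA p count vals = pvLoopA (p.takeWhile (fun c => c != 'z')) count vals := by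
  induction p with
  | nil => intro _ _; rfl
  | cons c cs ih =>
    intro count vals
    by_cases hz : c = 'z'
    · subst hz; simp [pvLoopA]
    · have hc : (c != 'z') = true := by simp [hz]
      have hz' : (c == 'z') = false := by simp [hz]
      simp only [List.takeWhile_cons, hc, if_true]
      by_cases hd : PySem.Chars.isdigit c = true
      · simp only [pvLoopA, hz', Bool.false_eq_true, if_false, hd, if_true]; exact ih _ _
      · simp only [pvLoopA, hz', Bool.false_eq_true, if_false, hd, if_false]; exact ih _ _

theorem pvTake_len_takeWhile {α : Type} (l : List α) (p : α → Bool) :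
    l.take (l.takeWhile p).length = l.takeWhile p :=
  (List.prefix_iff_eq_take.mp (List.takeWhile_prefix p)).symm

theorem pvDrop_len_takeWhile {α : Type} (l : List α) (p : α → Bool) :
    l.drop (l.takeWhile p).length = l.dropWhile p := by
  calc l.drop (l.takeWhile p).length
      = (l.takeWhile p ++ l.dropWhile p).drop (l.takeWhile p).length := by
        rw [List.takeWhile_append_dropWhile]
    _ = l.dropWhile p := List.drop_left

-- pvDecode on a non-digit-led list: the whole leading non-digit run at once
theorem pvDecode_cons_nondigit_run (c : Char) (cs : List Char)
    (h : PySem.Chars.isdigit c = false) :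
    pvDecode (c :: cs)
      = ((c :: cs.takeWhile (fun d => !PySem.Chars.isdigit d)).map
            (fun d => (d.toNat : Int) - 96)).sum
          + pvDecode (cs.dropWhile (fun d => !PySem.Chars.isdigit d)) := by
  have hfun : (fun d => PySem.Chars.isdigit d == false) = (fun d => !PySem.Chars.isdigit d) := by
    funext d; cases hd : PySem.Chars.isdigit d <;> simp
  rw [pvDecode, h, pvRunEnd_eq]
  simp only [hfun, List.drop_succ_cons, List.drop_zero, Bool.false_eq_true, if_false,
    Nat.add_comm 1 _, List.take_succ_cons, List.drop_succ_cons,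
    pvTake_len_takeWhile, pvDrop_len_takeWhile]

-- pvDecode eats one non-digit character at a time
theorem pvDecode_cons_nondigit (c : Char) (cs : List Char) (h : PySem.Chars.isdigit c = false) :
    pvDecode (c :: cs) = ((c.toNat : Int) - 96) + pvDecode cs := by
  rw [pvDecode_cons_nondigit_run c cs h]
  cases cs with
  | nil => simp [pvDecode]
  | cons d tl =>
    by_cases hd : PySem.Chars.isdigit d
    · simp [hd]
    · rw [pvDecode_cons_nondigit_run d tl (by simpa using hd)]
      simp [hd, add_assoc]

-- pvDecode on a digit-led list: one int over the maximal digit run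
theorem pvDecode_cons_digit (c : Char) (cs : List Char) (h : PySem.Chars.isdigit c = true) :
    pvDecode (c :: cs)
      = pvIntOf (c :: cs.takeWhile PySem.Chars.isdigit)
          + pvDecode (cs.dropWhile PySem.Chars.isdigit) := by
  have hfun : (fun d => PySem.Chars.isdigit d == true) = PySem.Chars.isdigit := by
    funext d; simp
  rw [pvDecode, h, pvRunEnd_eq]
  simp only [hfun, List.drop_succ_cons, List.drop_zero, if_true,
    Nat.add_comm 1 _, List.take_succ_cons, List.drop_succ_cons,
    pvTake_len_takeWhile, pvDrop_len_takeWhile]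

-- the central invariant of A's inner loop, against pvDecode
theorem pvLoopA_sum (body : List Char) (hz : 'z' ∉ body) : ∀ (count : List Char) (vals : List Int),
    (pvLoopA body count vals).sum
      = vals.sum +
        (if count.isEmpty then pvDecode body
         else pvIntOf (count ++ body.takeWhile PySem.Chars.isdigit)
                + pvDecode (body.dropWhile PySem.Chars.isdigit)) := by
  induction body with
  | nil =>
    intro count vals
    cases count with
    | nil => simp [pvLoopA, pvDecode]
    | cons a as => simp [pvLoopA, pvDecode]
  | cons c cs ih =>
    intro count vals
    have hcz : c ≠ 'z' := fun h => hz (h ▸ List.mem_cons_self ..)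
    have hz' : 'z' ∉ cs := fun h => hz (List.mem_cons_of_mem _ h)
    have hcez : (c == 'z') = false := by simp [hcz]
    by_cases hd : PySem.Chars.isdigit c = true
    · rw [show pvLoopA (c :: cs) count vals = pvLoopA cs (count ++ [c]) vals from by
        simp [pvLoopA, hcez, hd]]
      rw [ih hz' (count ++ [c]) vals]
      cases count with
      | nil =>
        simp only [List.nil_append, List.isEmpty_nil, List.isEmpty_cons, if_true,
          Bool.false_eq_true, if_false]
        rw [pvDecode_cons_digit c cs hd]
        simp
      | cons a as =>
        simp only [List.isEmpty_cons, Bool.false_eq_true, if_false, List.append_assoc,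
          List.cons_append, List.nil_append, List.takeWhile_cons, hd, if_true,
          List.dropWhile_cons]
    · rw [show pvLoopA (c :: cs) count vals
            = pvLoopA cs []
                ((if count.isEmpty then vals else vals ++ [pvIntOf count])
                  ++ [((c.toNat : Int) - 97) + 1]) from by
        simp [pvLoopA, hcez, hd]]
      rw [ih hz' [] _]
      rw [pvDecode_cons_nondigit c cs (by simpa using hd)]
      cases count with
      | nil =>
        simp only [List.isEmpty_nil, if_true, List.sum_append, List.sum_cons, List.sum_nil]
        ring
      | cons a as =>
        simp only [List.isEmpty_cons, Bool.false_eq_true, if_false, List.sum_append,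
          List.sum_cons, List.sum_nil, List.takeWhile_cons, hd, if_false,
          List.dropWhile_cons, List.append_nil, List.isEmpty_nil, if_true]
        rw [pvDecode_cons_nondigit c cs (by simpa using hd)]
        ring

-- ===== VERDICT (by name: the statement is the Claim_ definition above) =====
theorem convert_measurement_string_spec : Claim_equal_convert_measurement_string := by
  intro s _
  unfold Spec_convert_measurement_string convert_measurement_string convert_measurement_string_alt
  apply List.map_congr_left
  intro p _
  rw [pvBody_eq, pvLoopA_takeWhile]
  have hz : 'z' ∉ p.takeWhile (fun c => c != 'z') := by
    intro h
    have := List.mem_takeWhile_imp h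
    simp at this
  rw [pvLoopA_sum _ hz [] []]
  simp
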